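-- pv_equiv track=rewrite | github.com/sirasit-kmutnb/Software-Development-II | Week1/unittest_test/Ex6Unittest.py | count_row
-- ===== SOURCE A (Python) =====
-- def count_row(Matrix):
--     result = 0
--     for i in range(len(Matrix)):
--         for start in range(len(Matrix[i])):
--             number = 0
--             for j in range(len(Matrix[i])-start):
--                 if number < 10:
--                     number += Matrix[i][start+j]
--                     if number == 10:
--                         result += 1
--     return result
-- ===== SOURCE B (Python) =====
-- def count_row(Matrix):
--     result = 0
--     for row in Matrix:
--         active = []  # pending running sums of all open starts
--         for x in row:
--             active.append(0)  # a new subarray starts at this position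
--             nxt = []
--             for s in active:
--                 s += x
--                 if s == 10:
--                     result += 1
--                 if s < 10:
--                     nxt.append(s)
--             active = nxt
--     return result
-- ===== Notes on version B (the rewrite author's own statement) =====
-- stated objective: faster
-- what changed: B transposes the traversal: instead of A's per-start re-accumulation over each suffix, it makes one sweep per row over end positions maintaining the multiset of pending running sums of all open starts, retiring a start permanently at its first sum >= 10 (counting it iff that sum is exactly 10).
import Mathlib
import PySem

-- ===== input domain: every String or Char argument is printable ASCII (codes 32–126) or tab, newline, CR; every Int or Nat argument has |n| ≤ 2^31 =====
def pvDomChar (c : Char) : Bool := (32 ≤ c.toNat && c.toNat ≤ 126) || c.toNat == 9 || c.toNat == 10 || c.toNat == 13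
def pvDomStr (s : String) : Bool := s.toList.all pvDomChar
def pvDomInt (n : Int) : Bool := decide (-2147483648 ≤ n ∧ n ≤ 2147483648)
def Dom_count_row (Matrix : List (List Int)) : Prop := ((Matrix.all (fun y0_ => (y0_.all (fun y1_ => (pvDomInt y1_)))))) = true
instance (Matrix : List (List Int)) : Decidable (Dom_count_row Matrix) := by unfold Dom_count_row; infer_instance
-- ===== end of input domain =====

-- B transposes A's traversal: one sweep per row over end positions maintaining the pending
-- running sums of all open starts, retiring each start at its first sum ≥ 10 (objective: faster).

-- ===== PORT A =====
def count_row (Matrix : List (List Int)) : Int :=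
  (PySem.List.pyRange 0 (PySem.List.len Matrix) 1).foldl (fun result i =>
    let row := PySem.List.pyGetD Matrix i []
    (PySem.List.pyRange 0 (PySem.List.len row) 1).foldl (fun result start =>
      ((PySem.List.pyRange 0 (PySem.List.len row - start) 1).foldl
        (fun (st : Int × Int) j =>
          if st.1 < 10 then
            let number := st.1 + PySem.List.pyGetD row (start + j) 0
            (number, if number = 10 then st.2 + 1 else st.2)
          else st) (0, result)).2) result) 0

-- ===== PORT B =====
-- inner loop 'for s in active: …' of Source B: builds (nxt, result)
def pvInner (x : Int) (q : List Int × Int) (s : Int) : List Int × Int :=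
  let s' := s + x
  (if s' < 10 then q.1 ++ [s'] else q.1, if s' = 10 then q.2 + 1 else q.2)

-- per-element step of Source B's sweep: state = (active, result)
def pvStep (st : List Int × Int) (x : Int) : List Int × Int :=
  (st.1 ++ [0]).foldl (pvInner x) ([], st.2)

def count_row_alt (Matrix : List (List Int)) : Int :=
  Matrix.foldl (fun result row => (row.foldl pvStep ([], result)).2) 0

-- ===== PRECONDITION & SPEC =====
def Spec_count_row (Matrix : List (List Int)) (out : Int) : Prop := out = count_row_alt Matrix
instance (Matrix : List (List Int)) (out : Int) : Decidable (Spec_count_row Matrix out) := by unfold Spec_count_row; infer_instance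

-- ===== CLAIM (what is proved, stated in full; the proofs are below) =====
def Claim_equal_count_row : Prop := ∀ (Matrix : List (List Int)), Dom_count_row Matrix → Spec_count_row Matrix (count_row Matrix)

-- ===== LEMMAS AND PROOFS =====

-- contribution (0 or 1) of one start with current running sum s over the remaining suffix:
-- walk forward, stop at the first running sum ≥ 10, count 1 iff it is exactly 10
def pvC (s : Int) : List Int → Int
  | [] => 0
  | x :: xs => if 10 ≤ s + x then (if s + x = 10 then 1 else 0) else pvC (s + x) xs

-- total over all starts of a row
def pvStarts : List Int → Int
  | [] => 0
  | x :: xs => pvC 0 (x :: xs) + pvStarts xs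

-- ---- A side ----
def pvF (st : Int × Int) (x : Int) : Int × Int :=
  if st.1 < 10 then (st.1 + x, if st.1 + x = 10 then st.2 + 1 else st.2) else st

lemma pvF_frozen (l : List Int) (st : Int × Int) (h : ¬ st.1 < 10) : l.foldl pvF st = st := by
  induction l with
  | nil => rfl
  | cons x xs ih => simp [List.foldl, pvF, if_neg h, ih]

lemma pvF_spec (l : List Int) : ∀ (n res : Int), n < 10 → (l.foldl pvF (n, res)).2 = res + pvC n l := by
  induction l with
  | nil => intro n res _; simp [pvC]
  | cons x xs ih =>
    intro n res hn
    simp only [List.foldl, pvC, pvF, if_pos hn]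
    by_cases h10 : 10 ≤ n + x
    · rw [pvF_frozen xs (n + x, _) (by simpa using h10)]
      by_cases he : n + x = 10 <;> simp [he, if_pos h10]
    · rw [if_neg h10, if_neg (by omega : ¬ (n + x = 10)), ih (n + x) res (by omega)]

lemma pvGetD_drop (xs : List Int) (k : Nat) (j : Int) (hj : 0 ≤ j) (d : Int) :
    PySem.List.pyGetD xs ((k : Int) + j) d = PySem.List.pyGetD (xs.drop k) j d := by
  obtain ⟨m, rfl⟩ := Int.eq_ofNat_of_zero_le hj
  rw [show ((k : Int) + (m : Int)) = ((k + m : Nat) : Int) by push_cast; ring]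
  rw [PySem.List.pyGetD_natCast, PySem.List.pyGetD_natCast]
  simp [List.getD_eq_getElem?_getD, List.getElem?_drop]

-- proof-side name for A's per-row body
def pvRowA (result : Int) (row : List Int) : Int :=
  (PySem.List.pyRange 0 (PySem.List.len row) 1).foldl (fun result start =>
    ((PySem.List.pyRange 0 (PySem.List.len row - start) 1).foldl
      (fun st j => pvF st (PySem.List.pyGetD row (start + j) 0)) (0, result)).2) result

lemma pvRowA_inner (res : Int) (row : List Int) (start : Int) (h0 : 0 ≤ start) (h1 : start < PySem.List.len row) :
    ((PySem.List.pyRange 0 (PySem.List.len row - start) 1).foldl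
      (fun st j => pvF st (PySem.List.pyGetD row (start + j) 0)) (0, res)).2
      = res + pvC 0 (row.drop start.toNat) := by
  have hk : start = ((start.toNat : Nat) : Int) := by omega
  have hlen : PySem.List.len row - start = PySem.List.len (row.drop start.toNat) := by
    simp [PySem.List.len] at h1 ⊢; omega
  rw [hlen]
  rw [PySem.List.foldl_congr_mem _ _
      (fun st j => pvF st (PySem.List.pyGetD (row.drop start.toNat) j 0)) _
      (by
        intro acc j hj
        have hj0 : 0 ≤ j := (PySem.List.mem_pyRange_one.mp hj).1
        rw [hk, pvGetD_drop row start.toNat j hj0 0]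
        simp only [Int.toNat_natCast])]
  rw [PySem.List.foldl_pyRange_zero_pyGetD (row.drop start.toNat) 0 pvF (0, res)]
  exact pvF_spec _ 0 res (by omega)

lemma pvSumRange (row : List Int) :
    ((List.range row.length).map (fun k => pvC 0 (row.drop k))).sum = pvStarts row := by
  induction row with
  | nil => simp [pvStarts]
  | cons x xs ih =>
    simp only [List.length_cons]
    rw [List.range_succ_eq_map]
    simp only [List.map_cons, List.map_map, List.sum_cons, List.drop_zero]
    rw [show ((List.range xs.length).map ((fun k => pvC 0 ((x :: xs).drop k)) ∘ Nat.succ))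
        = (List.range xs.length).map (fun k => pvC 0 (xs.drop k)) from by
      apply List.map_congr_left; intro k _; rfl]
    rw [ih, pvStarts]

lemma pvRowA_eq (res : Int) (row : List Int) : pvRowA res row = res + pvStarts row := by
  unfold pvRowA
  rw [PySem.List.foldl_congr_mem _ _ (fun r start => r + pvC 0 (row.drop start.toNat)) _
      (by
        intro acc start hmem
        have h := PySem.List.mem_pyRange_one.mp hmem
        exact pvRowA_inner acc row start h.1 h.2)]
  rw [PySem.List.foldl_add]
  rw [PySem.List.pyRange_one]
  simp only [List.map_map, Int.sub_zero]
  have hlen : (PySem.List.len row).toNat = row.length := by simp [PySem.List.len]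
  rw [hlen]
  rw [show (List.range row.length).map ((fun start => pvC 0 (row.drop start.toNat)) ∘ (fun k : Nat => (0 : Int) + k))
      = (List.range row.length).map (fun k => pvC 0 (row.drop k)) from by
    apply List.map_congr_left; intro k _; simp]
  rw [pvSumRange row]

-- ---- B side ----
lemma pvInner_spec (x : Int) (act : List Int) : ∀ (acc : List Int) (res : Int),
    act.foldl (pvInner x) (acc, res)
      = (acc ++ ((act.map (· + x)).filter (fun s => decide (s < 10))),
         res + (act.map (fun s => if s + x = 10 then (1 : Int) else 0)).sum) := by
  induction act with
  | nil => intro acc res; simp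
  | cons a as ih =>
    intro acc res
    simp only [List.foldl, pvInner, List.map_cons, List.filter_cons, List.sum_cons]
    rw [ih]
    by_cases hl : a + x < 10 <;> by_cases he : a + x = 10 <;>
      simp [hl, he, List.append_assoc] <;> ring

-- one start's contribution splits at the first element: counted now, dropped, or carried on
lemma pvC_split (x : Int) (xs : List Int) (act : List Int) :
    (act.map (fun s => pvC s (x :: xs))).sum
      = (act.map (fun s => if s + x = 10 then (1 : Int) else 0)).sum
        + (((act.map (· + x)).filter (fun s => decide (s < 10))).map (fun s => pvC s xs)).sum := by
  induction act with
  | nil => simp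
  | cons a as ih =>
    simp only [List.map_cons, List.sum_cons, List.filter_cons]
    by_cases hl : a + x < 10
    · rw [if_neg (by omega : ¬ (a + x = 10))]
      simp only [decide_eq_true_eq, hl, if_pos, List.map_cons, List.sum_cons]
      rw [show pvC a (x :: xs) = pvC (a + x) xs from by
        simp [pvC, if_neg (by omega : ¬ (10 ≤ a + x))]]
      rw [ih]; ring
    · have h10 : 10 ≤ a + x := by omega
      rw [show pvC a (x :: xs) = if a + x = 10 then 1 else 0 from by simp [pvC, if_pos h10]]
      simp only [decide_eq_true_eq, hl, if_false]
      rw [ih]; ring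

-- sweep invariant: result after the sweep = result + pending contributions + new-start contributions
lemma pvSweep (l : List Int) : ∀ (active : List Int) (res : Int),
    (l.foldl pvStep (active, res)).2
      = res + (active.map (fun s => pvC s l)).sum + pvStarts l := by
  induction l with
  | nil =>
    intro active res
    simp [pvStarts, pvC]
  | cons x xs ih =>
    intro active res
    have hstep : pvStep (active, res) x
        = (((active ++ [0]).map (· + x)).filter (fun s => decide (s < 10)),
           res + ((active ++ [0]).map (fun s => if s + x = 10 then (1 : Int) else 0)).sum) := by
      unfold pvStep
      rw [pvInner_spec]
      simp
    rw [List.foldl_cons, hstep, ih]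
    have hspl := pvC_split x xs (active ++ [0])
    rw [pvStarts, show pvC 0 (x :: xs) = ([(0 : Int)].map (fun s => pvC s (x :: xs))).sum from by simp]
    rw [show res + (active.map (fun s => pvC s (x :: xs))).sum
          + (([(0 : Int)].map (fun s => pvC s (x :: xs))).sum + pvStarts xs)
        = res + ((active ++ [0]).map (fun s => pvC s (x :: xs))).sum + pvStarts xs from by
      rw [List.map_append, List.sum_append]; ring]
    rw [hspl]; ring

-- ===== VERDICT (by name: the statement is the Claim_ definition above) =====
theorem count_row_spec : Claim_equal_count_row := by
  intro M _
  show count_row M = count_row_alt M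
  have hA : count_row M = M.foldl pvRowA 0 := by
    show (PySem.List.pyRange 0 (PySem.List.len M) 1).foldl
        (fun result i => pvRowA result (PySem.List.pyGetD M i [])) 0 = _
    exact PySem.List.foldl_pyRange_zero_pyGetD M [] pvRowA 0
  rw [hA]
  unfold count_row_alt
  apply PySem.List.foldl_congr_mem
  intro acc row _
  rw [pvRowA_eq, pvSweep row [] acc]
  simp
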